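-- pv_equiv track=rewrite | github.com/ohzeno/Algo | Programmers/NonCompany/Mock PCCP/1회/1번 - 외톨이 알파벳.py | solution
-- ===== SOURCE A (Python) =====
-- def solution(input_string):
--     loners = set()
--     logs = {}
--     for i, c in enumerate(input_string):
--         if c in loners:
--             continue
--         if c in logs and logs[c] + 1 != i:
--             loners.add(c)
--             continue
--         logs[c] = i
--     if not loners:
--         return 'N'
--     return ''.join(sorted(loners))
-- ===== SOURCE B (Python) =====
-- def solution(input_string):
--     # Collapse the string into the sequence of maximal-run keys, then count runs per letter.
--     runs = []
--     for c in input_string: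
--         if not runs or runs[-1] != c:
--             runs.append(c)
--     counts = {}
--     for c in runs:
--         counts[c] = counts.get(c, 0) + 1
--     loners = sorted(c for c, n in counts.items() if n > 1)
--     return ''.join(loners) if loners else 'N'
-- ===== Notes on version B (the rewrite author's own statement) =====
-- stated objective: simpler
-- what changed: B collapses the string into maximal consecutive runs and counts runs per letter (loner iff >1 run), replacing A's per-index gap tracking with a loner set and a dict of last-seen indices.
import Mathlib
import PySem

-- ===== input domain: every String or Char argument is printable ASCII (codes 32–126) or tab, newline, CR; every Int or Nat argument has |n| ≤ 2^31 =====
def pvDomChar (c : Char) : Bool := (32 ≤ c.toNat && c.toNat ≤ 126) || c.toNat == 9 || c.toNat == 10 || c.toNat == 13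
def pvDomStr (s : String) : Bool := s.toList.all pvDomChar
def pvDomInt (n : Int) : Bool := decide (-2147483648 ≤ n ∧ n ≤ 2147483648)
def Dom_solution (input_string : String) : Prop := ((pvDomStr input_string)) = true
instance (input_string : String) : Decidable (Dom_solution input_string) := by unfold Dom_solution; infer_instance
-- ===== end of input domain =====

-- B collapses the string into maximal consecutive runs and counts runs per letter
-- (loner iff more than one run), replacing A's last-seen-index gap tracking; objective: simpler.

-- ===== PORT A =====
-- state: (loners, logs) exactly as in A's loop; the pair argument is (i, c) from enumerate
def solutionStep (st : PySem.Set Char × PySem.Dict Char Int) (p : Int × Char) :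
    PySem.Set Char × PySem.Dict Char Int :=
  if st.1.contains p.2 then st
  else if st.2.contains p.2 && st.2.getD p.2 0 + 1 != p.1 then (st.1.add p.2, st.2)
  else (st.1, st.2.insert p.2 p.1)

def solution (input_string : String) : String :=
  let st := (PySem.List.enumerate input_string.toList 0).foldl solutionStep
      (PySem.Set.empty, PySem.Dict.empty)
  if st.1 = [] then "N"
  else String.ofList (PySem.List.sorted st.1 (fun c => c))

-- ===== PORT B =====
-- runs.append(c) when runs is empty or runs[-1] != c
def altRunStep (runs : List Char) (c : Char) : List Char :=
  if runs.getLast? = some c then runs else runs ++ [c]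

def solution_alt (input_string : String) : String :=
  let runs := input_string.toList.foldl altRunStep []
  let counts := runs.foldl (fun d c => d.insert c (d.getD c 0 + 1))
      (PySem.Dict.empty : PySem.Dict Char Int)
  let loners := PySem.List.sorted ((counts.items.filter (fun p => 1 < p.2)).map (·.1)) (fun c => c)
  if loners = [] then "N" else String.ofList loners

-- ===== PRECONDITION & SPEC =====
def Spec_solution (input_string : String) (out : String) : Prop := out = solution_alt input_string
instance (input_string : String) (out : String) : Decidable (Spec_solution input_string out) := by unfold Spec_solution; infer_instance

-- ===== CLAIM (what is proved, stated in full; the proofs are below) =====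
def Claim_equal_solution : Prop := ∀ (input_string : String), Dom_solution input_string → Spec_solution input_string (solution input_string)

-- ===== LEMMAS AND PROOFS =====

-- the run-key list of a prefix (B's first fold)
def runsF (p : List Char) : List Char := p.foldl altRunStep []

lemma runsF_snoc (p : List Char) (c : Char) :
    runsF (p ++ [c]) = if (runsF p).getLast? = some c then runsF p else runsF p ++ [c] := by
  simp [runsF, altRunStep]

lemma getLast?_runsF (p : List Char) : (runsF p).getLast? = p.getLast? := by
  induction p using List.reverseRecOn with
  | nil => rfl
  | append_singleton p c ih =>
      rw [runsF_snoc]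
      split_ifs with h
      · simp [ih] at h; simp [ih, h]
      · simp

lemma mem_runsF (p : List Char) (c : Char) : c ∈ runsF p ↔ c ∈ p := by
  induction p using List.reverseRecOn with
  | nil => simp [runsF]
  | append_singleton p a ih =>
      rw [runsF_snoc]
      split_ifs with h
      · rw [getLast?_runsF] at h
        have ha : a ∈ p := List.mem_of_getLast? h
        simp [ih]
        intro hc; rw [hc]; exact ha
      · simp [ih]

lemma enumerate_snoc (xs : List Char) (c : Char) (s : Int) :
    PySem.List.enumerate (xs ++ [c]) s = PySem.List.enumerate xs s ++ [(s + xs.length, c)] := by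
  induction xs generalizing s with
  | nil => simp [PySem.List.enumerate]
  | cons x t ih => simp [PySem.List.enumerate, ih]; ring

-- the loop invariant of A: loners holds exactly the letters with ≥ 2 runs so far,
-- logs knows, for each letter still in the running, the last index it was seen at
def InvA (p : List Char) (st : PySem.Set Char × PySem.Dict Char Int) : Prop :=
  st.1.Nodup ∧
  (∀ c, c ∈ st.1 ↔ 2 ≤ (runsF p).count c) ∧
  (∀ c, st.2.contains c = true ↔ c ∈ p) ∧
  (∀ c, (runsF p).count c ≤ 1 → c ∈ p →
     ∃ j : Int, st.2.get? c = some j ∧ 0 ≤ j ∧ j < p.length ∧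
       (j = (p.length : Int) - 1 ↔ p.getLast? = some c))

lemma len_snoc_int (p : List Char) (c : Char) :
    ((p ++ [c]).length : Int) - 1 = (p.length : Int) := by simp

lemma step_preserves (p : List Char) (c : Char)
    (st : PySem.Set Char × PySem.Dict Char Int) (h : InvA p st) :
    InvA (p ++ [c]) (solutionStep st ((p.length : Int), c)) := by
  obtain ⟨hnd, h1, h2, h3⟩ := h
  by_cases hcnt : 2 ≤ (runsF p).count c
  · -- already a loner: state unchanged
    have hclm : c ∈ st.1 := (h1 c).2 hcnt
    have hstep : solutionStep st ((p.length : Int), c) = st := by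
      simp [solutionStep, hclm]
    rw [hstep]
    have hcp : c ∈ p := (mem_runsF p c).1 (List.count_pos_iff.1 (by omega))
    have hcount : ∀ d, (runsF p).count d ≤ (runsF (p ++ [c])).count d ∧
        (runsF (p ++ [c])).count d ≤ (runsF p).count d + (if d = c then 1 else 0) := by
      intro d
      rw [runsF_snoc]
      by_cases hdc : d = c
      · subst hdc
        have hone : List.count d [d] = 1 := by simp
        rw [if_pos rfl]
        split_ifs with hl
        · exact ⟨le_refl _, by omega⟩
        · rw [List.count_append, hone]
          exact ⟨by omega, by omega⟩
      · have hzero : List.count d [c] = 0 := by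
          rw [List.count_singleton]; simp [Ne.symm hdc]
        rw [if_neg hdc]
        split_ifs with hl
        · exact ⟨le_refl _, by omega⟩
        · rw [List.count_append, hzero]
          exact ⟨by omega, by omega⟩
    refine ⟨hnd, fun d => ?_, fun d => ?_, fun d hd hdp => ?_⟩
    · rcases hcount d with ⟨hle, hge⟩
      rw [h1 d]
      by_cases hdc : d = c
      · subst hdc; constructor <;> intro _ <;> omega
      · simp [hdc] at hge; omega
    · rw [h2 d]; simp
      intro hdc; rw [hdc]; exact hcp
    · rcases hcount d with ⟨hle, hge⟩
      have hdc : d ≠ c := by rintro rfl; omega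
      obtain ⟨j, hj, hj0, hjlt, hjiff⟩ := h3 d (by omega) (by simp at hdp; tauto)
      refine ⟨j, hj, hj0, by simp only [List.length_append, List.length_singleton]; push_cast; omega, ?_⟩
      rw [List.getLast?_concat, len_snoc_int]
      exact ⟨fun hje => absurd hje (by omega),
             fun hsc => absurd (Option.some.inj hsc) (fun hh => hdc hh.symm)⟩
  · -- at most one run of c so far: c is not a loner
    have hclm : c ∉ st.1 := fun hm => hcnt ((h1 c).1 hm)
    by_cases hcp : c ∈ p
    · -- seen before
      have hc1 : (runsF p).count c = 1 := by
        have : 0 < (runsF p).count c := List.count_pos_iff.2 ((mem_runsF p c).2 hcp)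
        omega
      obtain ⟨j, hj, hj0, hjlt, hjiff⟩ := h3 c (by omega) hcp
      have hctn : st.2.contains c = true := (h2 c).2 hcp
      have hgd : st.2.getD c 0 = j := by simp [PySem.Dict.getD, hj]
      by_cases hlast : p.getLast? = some c
      · -- run continues: logs[c] := i
        have hje : j = (p.length : Int) - 1 := hjiff.2 hlast
        have hb : (st.2.getD c 0 + 1 != ((p.length : Int))) = false := by
          rw [hgd, hje]; simp
        have hstep : solutionStep st ((p.length : Int), c) =
            (st.1, st.2.insert c (p.length : Int)) := by
          simp [solutionStep, hclm, hb]
        have hruns : runsF (p ++ [c]) = runsF p := by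
          rw [runsF_snoc, getLast?_runsF, if_pos hlast]
        rw [hstep]
        refine ⟨hnd, fun d => by rw [hruns]; exact h1 d, fun d => ?_, fun d hd hdp => ?_⟩
        · rw [PySem.Dict.contains_insert, Bool.or_eq_true, beq_iff_eq, h2 d]
          simp; tauto
        · rw [hruns] at hd
          by_cases hdc : d = c
          · subst hdc
            refine ⟨(p.length : Int), PySem.Dict.get?_insert_self st.2 d (p.length : Int),
              by positivity, by simp only [List.length_append, List.length_singleton]; push_cast; omega, ?_⟩
            rw [List.getLast?_concat, len_snoc_int]
            exact ⟨fun _ => rfl, fun _ => rfl⟩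
          · obtain ⟨j', hj', hj0', hjlt', hjiff'⟩ := h3 d hd (by simp at hdp; tauto)
            refine ⟨j', by rw [PySem.Dict.get?_insert_of_ne st.2 _ hdc]; exact hj', hj0',
              by simp only [List.length_append, List.length_singleton]; push_cast; omega, ?_⟩
            rw [List.getLast?_concat, len_snoc_int]
            exact ⟨fun hje' => absurd hje' (by omega),
                   fun hsc => absurd (Option.some.inj hsc) (fun hh => hdc hh.symm)⟩
      · -- gap: c becomes a loner
        have hjne : j + 1 ≠ (p.length : Int) := by
          intro he; exact hlast (hjiff.1 (by omega))
        have hb : (st.2.getD c 0 + 1 != ((p.length : Int))) = true := by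
          rw [hgd]; simpa using hjne
        have hstep : solutionStep st ((p.length : Int), c) = (st.1.add c, st.2) := by
          simp [solutionStep, hclm, hctn, hb]
        have hruns : runsF (p ++ [c]) = runsF p ++ [c] := by
          rw [runsF_snoc, getLast?_runsF, if_neg hlast]
        rw [hstep]
        refine ⟨PySem.Set.nodup_add st.1 c hnd, fun d => ?_, fun d => ?_, fun d hd hdp => ?_⟩
        · rw [hruns, PySem.Set.mem_add]
          rw [h1 d]
          by_cases hdc : d = c
          · subst hdc; simp [List.count_append, hc1]
          · simp [List.count_append, Ne.symm hdc, hdc]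
        · rw [h2 d]; simp
          intro hdc; rw [hdc]; exact hcp
        · rw [hruns] at hd
          have hdc : d ≠ c := by
            rintro rfl
            simp [List.count_append, hc1] at hd
          obtain ⟨j', hj', hj0', hjlt', hjiff'⟩ := h3 d
            (by simp [List.count_append, Ne.symm hdc] at hd; omega)
            (by simp at hdp; tauto)
          refine ⟨j', hj', hj0',
            by simp only [List.length_append, List.length_singleton]; push_cast; omega, ?_⟩
          rw [List.getLast?_concat, len_snoc_int]
          exact ⟨fun hje' => absurd hje' (by omega),
                 fun hsc => absurd (Option.some.inj hsc) (fun hh => hdc hh.symm)⟩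
    · -- brand new letter
      have hctn : st.2.contains c = false :=
        Bool.eq_false_iff.2 (fun ht => hcp ((h2 c).1 ht))
      have hstep : solutionStep st ((p.length : Int), c) =
          (st.1, st.2.insert c (p.length : Int)) := by
        simp [solutionStep, hclm, hctn]
      have hc0 : (runsF p).count c = 0 := by
        rw [List.count_eq_zero]
        intro hmem; exact hcp ((mem_runsF p c).1 hmem)
      have hlast : p.getLast? ≠ some c := fun hl => hcp (List.mem_of_getLast? hl)
      have hruns : runsF (p ++ [c]) = runsF p ++ [c] := by
        rw [runsF_snoc, getLast?_runsF, if_neg hlast]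
      rw [hstep]
      refine ⟨hnd, fun d => ?_, fun d => ?_, fun d hd hdp => ?_⟩
      · rw [hruns, h1 d]
        by_cases hdc : d = c
        · subst hdc; simp [List.count_append, hc0]
        · simp [List.count_append, Ne.symm hdc]
      · rw [PySem.Dict.contains_insert, Bool.or_eq_true, beq_iff_eq, h2 d]
        simp; tauto
      · rw [hruns] at hd
        by_cases hdc : d = c
        · subst hdc
          refine ⟨(p.length : Int), PySem.Dict.get?_insert_self st.2 d (p.length : Int),
            by positivity, by simp only [List.length_append, List.length_singleton]; push_cast; omega, ?_⟩
          rw [List.getLast?_concat, len_snoc_int]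
          exact ⟨fun _ => rfl, fun _ => rfl⟩
        · obtain ⟨j', hj', hj0', hjlt', hjiff'⟩ := h3 d
            (by simp [List.count_append, Ne.symm hdc] at hd; omega)
            (by simp at hdp; tauto)
          refine ⟨j', by rw [PySem.Dict.get?_insert_of_ne st.2 _ hdc]; exact hj', hj0',
            by simp only [List.length_append, List.length_singleton]; push_cast; omega, ?_⟩
          rw [List.getLast?_concat, len_snoc_int]
          exact ⟨fun hje' => absurd hje' (by omega),
                 fun hsc => absurd (Option.some.inj hsc) (fun hh => hdc hh.symm)⟩

lemma invA_all (cs : List Char) :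
    InvA cs ((PySem.List.enumerate cs 0).foldl solutionStep (PySem.Set.empty, PySem.Dict.empty)) := by
  induction cs using List.reverseRecOn with
  | nil =>
      refine ⟨List.nodup_nil, fun c => ?_, fun c => ?_, fun c _ hc => absurd hc (List.not_mem_nil)⟩
      · simp [PySem.Set.empty, runsF]
      · simp [PySem.Dict.contains_empty]
  | append_singleton p c ih =>
      rw [enumerate_snoc, List.foldl_append]
      have := step_preserves p c _ ih
      simpa using this

lemma main_eq (s : String) : solution s = solution_alt s := by
  obtain ⟨hnd, h1, h2, h3⟩ := invA_all s.toList
  set st := (PySem.List.enumerate s.toList 0).foldl solutionStep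
      (PySem.Set.empty, PySem.Dict.empty) with hst
  set runs := s.toList.foldl altRunStep [] with hruns
  have hrunsF : runs = runsF s.toList := rfl
  set counts := runs.foldl (fun d c => d.insert c (d.getD c 0 + 1))
      (PySem.Dict.empty : PySem.Dict Char Int) with hcounts
  have hkeys : counts.keys = PySem.Set.ofList runs := by
    rw [hcounts, PySem.Dict.keys_foldl_insert runs (fun d x => d.getD x 0 + 1) PySem.Dict.empty]
    rfl
  have hknd : counts.keys.Nodup := by
    rw [hkeys]; exact PySem.Set.nodup_ofList runs
  have hgetD : ∀ k, counts.getD k 0 = (runs.count k : Int) := by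
    intro k
    rw [hcounts, PySem.Dict.getD_foldl_insert_add_one runs PySem.Dict.empty k,
        PySem.Dict.getD_empty]
    ring
  have hitems : counts.items = counts.keys.map (fun k => (k, counts.getD k 0)) :=
    PySem.Dict.items_eq_map_keys counts hknd 0
  set L := (counts.items.filter (fun p => 1 < p.2)).map (·.1) with hL
  have hLeq : L = (PySem.Set.ofList runs).filter (fun k => decide (1 < (runs.count k : Int))) := by
    rw [hL, hitems, hkeys, List.filter_map, List.map_map]
    have : ∀ k, ((fun p => decide (1 < p.2)) ∘ (fun k => (k, counts.getD k 0))) k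
        = (fun k => decide (1 < (runs.count k : Int))) k := by
      intro k; simp [hgetD k]
    rw [List.filter_congr (fun k _ => this k)]
    exact List.map_id' _
  have hLnd : L.Nodup := by
    rw [hLeq]; exact (PySem.Set.nodup_ofList runs).filter _
  have hLmem : ∀ a, a ∈ L ↔ 2 ≤ (runsF s.toList).count a := by
    intro a
    rw [hLeq]
    simp only [List.mem_filter, PySem.Set.mem_ofList, decide_eq_true_eq, ← hrunsF]
    constructor
    · rintro ⟨_, hgt⟩; omega
    · intro hge
      exact ⟨List.count_pos_iff.1 (by omega), by omega⟩
  have hperm : st.1.Perm L := by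
    rw [List.perm_ext_iff_of_nodup hnd hLnd]
    intro a
    rw [h1 a, hLmem a]
  have hsorted : PySem.List.sorted st.1 (fun c => c) = PySem.List.sorted L (fun c => c) := by
    have hSp : (PySem.List.sorted L (fun c => c)).Perm st.1 :=
      (PySem.List.sorted_perm L (fun c => c) false).trans hperm.symm
    have hnds : (PySem.List.sorted L (fun c => c)).Nodup := (hSp.nodup_iff).2 hnd
    have hpw : (PySem.List.sorted L (fun c => c)).Pairwise (fun a b => a < b) := by
      have hle := PySem.List.sorted_pairwise L (fun c => c)
      exact (hle.and hnds).imp (fun hab => lt_of_le_of_ne hab.1 hab.2)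
    exact PySem.List.sorted_eq_of_perm_of_pairwise_lt st.1 _ (fun c => c) hSp hpw
  have hempty : st.1 = [] ↔ PySem.List.sorted L (fun c => c) = [] := by
    rw [← hsorted]
    constructor
    · intro he; rw [he]; rfl
    · intro he
      exact List.Perm.eq_nil ((he ▸ (PySem.List.sorted_perm st.1 (fun c => c) false)).symm)
  show (if st.1 = [] then "N" else String.ofList (PySem.List.sorted st.1 (fun c => c))) =
      (if PySem.List.sorted L (fun c => c) = [] then "N"
       else String.ofList (PySem.List.sorted L (fun c => c)))
  split_ifs with ha hb hb
  · rfl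
  · exact absurd (hempty.1 ha) hb
  · exact absurd (hempty.2 hb) ha
  · rw [hsorted]

-- ===== VERDICT (by name: the statement is the Claim_ definition above) =====
theorem solution_spec : Claim_equal_solution := by
  intro s _
  unfold Spec_solution
  exact main_eq s
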